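-- pv_equiv track=rewrite | github.com/rjovelin/Rosalind | Textbook_track/BA1J/BA1J.py | build_k_mer_index
-- ===== SOURCE A (Python) =====
-- def build_k_mer_index(text, kmer):
--     '''
--     (str, int) -> dict
--     Take a string text, the length of a kmer and return a dictionary with
--     strings of length kmer in text as key and a list of the kmers positions in text
--     '''
--
--     # initiate dict
--     text_index = {}
--
--     # loop ober text
--     for i in range(0, len(text) - kmer + 1):
--         # grab kmer string
--         subseq = text[i:i+ kmer]
--         # check if subseq in dict
--         if subseq not in text_index:
--             # add key and intiate list value
--             text_index[subseq] = [i]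
--         elif subseq in text_index:
--             # add index to list
--             text_index[subseq].append(i)
--
--     return text_index
-- ===== SOURCE B (Python) =====
-- def build_k_mer_index(text, kmer):
--     '''
--     (str, int) -> dict
--     Re-implementation: slice out every k-mer once, deduplicate the keys in
--     first-occurrence order, then build each position list by a scan per
--     distinct k-mer.
--     '''
--     subs = [text[i:i + kmer] for i in range(len(text) - kmer + 1)]
--     return {s: [i for i in range(len(subs)) if subs[i] == s]
--             for s in dict.fromkeys(subs)}
-- ===== Notes on version B (the rewrite author's own statement) =====
-- stated objective: alternative
-- what changed: A builds the index in one pass with a dict that inserts or appends per position; B first materialises the list of all k-mer slices, deduplicates the keys in first-occurrence order, and then builds each key's position list by a separate scan over the slice list.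
import Mathlib
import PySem

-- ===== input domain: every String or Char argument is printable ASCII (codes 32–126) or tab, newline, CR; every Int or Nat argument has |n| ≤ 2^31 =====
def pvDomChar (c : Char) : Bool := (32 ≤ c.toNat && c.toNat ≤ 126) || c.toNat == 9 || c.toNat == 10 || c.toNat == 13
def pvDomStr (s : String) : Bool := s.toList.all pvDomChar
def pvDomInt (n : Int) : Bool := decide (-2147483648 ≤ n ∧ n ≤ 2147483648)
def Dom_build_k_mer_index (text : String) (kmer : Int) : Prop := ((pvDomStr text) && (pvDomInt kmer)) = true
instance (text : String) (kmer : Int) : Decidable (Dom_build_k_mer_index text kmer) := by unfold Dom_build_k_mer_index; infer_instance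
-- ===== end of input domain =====

-- B replaces A's one-pass dict-building loop by: slice all k-mers, dedup the keys
-- in first-occurrence order, then one scan per distinct k-mer ('alternative', not faster).


-- ===== PORT A =====
def build_k_mer_index (text : String) (kmer : Int) : List (String × List Int) :=
  ((PySem.List.pyRange 0 ((text.toList.length : Int) - kmer + 1) 1).foldl
    (fun d i =>
      -- subseq = text[i:i+kmer]
      if d.contains (String.ofList (PySem.List.slice text.toList (some i) (some (i + kmer)))) = false then
        d.insert (String.ofList (PySem.List.slice text.toList (some i) (some (i + kmer)))) [i]
      else if d.contains (String.ofList (PySem.List.slice text.toList (some i) (some (i + kmer)))) = true then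
        d.modify (String.ofList (PySem.List.slice text.toList (some i) (some (i + kmer)))) [] (fun l => l ++ [i])
      else d)
    (PySem.Dict.empty : PySem.Dict String (List Int))).items

-- ===== PORT B =====
def build_k_mer_index_alt (text : String) (kmer : Int) : List (String × List Int) :=
  let subs := (PySem.List.pyRange 0 ((text.toList.length : Int) - kmer + 1) 1).map
      (fun i => String.ofList (PySem.List.slice text.toList (some i) (some (i + kmer))))
  (PySem.List.dedup subs).map (fun s =>
      (s, (PySem.List.pyRange 0 ((subs.length : Int)) 1).filter
            (fun j => PySem.List.pyGetD subs j "" == s)))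

-- ===== PRECONDITION & SPEC =====
def Spec_build_k_mer_index (text : String) (kmer : Int) (out : List (String × List Int)) : Prop := out = build_k_mer_index_alt text kmer
instance (text : String) (kmer : Int) (out : List (String × List Int)) : Decidable (Spec_build_k_mer_index text kmer out) := by unfold Spec_build_k_mer_index; infer_instance

-- ===== CLAIM (what is proved, stated in full; the proofs are below) =====
def Claim_equal_build_k_mer_index : Prop := ∀ (text : String) (kmer : Int), Dom_build_k_mer_index text kmer → Spec_build_k_mer_index text kmer (build_k_mer_index text kmer)

-- ===== LEMMAS AND PROOFS =====

-- A's insert-on-new-key branch is the same dict operation as modify with default []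
theorem insert_eq_modify_append (d : PySem.Dict String (List Int)) (s : String) (i : Int)
    (h : d.contains s = false) : d.insert s [i] = d.modify s [] (fun l => l ++ [i]) := by
  simp [PySem.Dict.insert, PySem.Dict.modify, h, PySem.Dict.getD_of_not_contains d [] h]

-- A's three-way branch collapses to the single modify step
theorem stepA_eq_modify (d : PySem.Dict String (List Int)) (s : String) (i : Int) :
    (if d.contains s = false then d.insert s [i]
     else if d.contains s = true then d.modify s [] (fun l => l ++ [i]) else d)
      = d.modify s [] (fun l => l ++ [i]) := by
  cases h : d.contains s with
  | false => simp [insert_eq_modify_append d s i h]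
  | true => simp

theorem pyRange_length_idem (n : Int) :
    PySem.List.pyRange 0 (((PySem.List.pyRange 0 n 1).length : Int)) 1 = PySem.List.pyRange 0 n 1 := by
  simp [PySem.List.pyRange_one]
  have h : (max n 0).toNat = n.toNat := by omega
  rw [h]

theorem build_k_mer_index_spec' (text : String) (kmer : Int) :
    build_k_mer_index text kmer = build_k_mer_index_alt text kmer := by
  unfold build_k_mer_index build_k_mer_index_alt
  simp only []
  set cs := text.toList with hcs
  set n : Int := (cs.length : Int) - kmer + 1 with hn
  set f : Int → String := fun i => String.ofList (PySem.List.slice cs (some i) (some (i + kmer))) with hf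
  set l := PySem.List.pyRange 0 n 1 with hl
  -- collapse A's branch to the single modify step
  have h1 : (l.foldl
      (fun d i =>
        if d.contains (f i) = false then d.insert (f i) [i]
        else if d.contains (f i) = true then d.modify (f i) [] (fun v => v ++ [i]) else d)
      (PySem.Dict.empty : PySem.Dict String (List Int)))
      = l.foldl (fun d i => d.modify (f i) [] (fun v => v ++ [i])) PySem.Dict.empty := by
    congr 1
    funext d i
    exact stepA_eq_modify d (f i) i
  simp only [hf] at h1
  rw [h1]
  -- view the loop as a fold over the (key, position) pairs
  have h2 : (l.foldl (fun d i => d.modify (f i) [] (fun v => v ++ [i]))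
      (PySem.Dict.empty : PySem.Dict String (List Int)))
      = (l.map (fun i => (f i, i))).foldl (fun d p => d.modify p.1 [] (fun v => v ++ [p.2]))
          PySem.Dict.empty := by
    rw [List.foldl_map]
  rw [h2]
  set ps : List (String × Int) := l.map (fun i => (f i, i)) with hps
  set D := ps.foldl (fun d p => d.modify p.1 [] (fun v => v ++ [p.2]))
      (PySem.Dict.empty : PySem.Dict String (List Int)) with hD
  have hkeys : D.keys = PySem.List.dedup (l.map f) := by
    rw [hD, PySem.Dict.keys_foldl_modify_key ps Prod.fst [] (fun _ p => fun v => v ++ [p.2])]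
    simp [PySem.List.dedup_eq_ofList, hps, List.map_map, PySem.Dict.keys_empty]
    rfl
  have hnodup : D.keys.Nodup := by
    rw [hkeys]; exact PySem.List.nodup_dedup _
  rw [PySem.Dict.items_eq_map_keys D hnodup [], hkeys]
  apply List.map_congr_left
  intro k _
  have hval : D.getD k [] = (ps.filter (fun p => p.1 == k)).map (fun p => p.2) := by
    rw [hD, PySem.Dict.getD_foldl_modify_append]
    simp [PySem.Dict.getD_empty]
  rw [hval]
  congr 1
  -- both sides are the positions i in l with f i = k
  have hlen : ((l.map f).length : Int) = (l.length : Int) := by simp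
  rw [hps, List.filter_map, List.map_map, hlen, hl, pyRange_length_idem]
  have : (fun p : String × Int => p.1 == k) ∘ (fun i => (f i, i)) = fun i => f i == k := rfl
  rw [this]
  have hmapid : List.map ((fun p : String × Int => p.2) ∘ fun i => (f i, i))
      = List.map (id : Int → Int) := rfl
  rw [hmapid, List.map_id]
  apply List.filter_congr
  intro j hj
  rw [← hl] at hj
  have hjmem := (PySem.List.mem_pyRange_one).1 (hl ▸ hj)
  rw [PySem.List.pyGetD_map_pyRange_of_nonneg f n j "" hjmem.1 hjmem.2]

-- ===== VERDICT (by name: the statement is the Claim_ definition above) =====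
theorem build_k_mer_index_spec : Claim_equal_build_k_mer_index := by
  intro text kmer _
  unfold Spec_build_k_mer_index
  exact build_k_mer_index_spec' text kmer
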